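-- pv_equiv track=rewrite | github.com/Jojodicus/fau-kryptographie1 | scripts/ciphers/substitution/masc.py | _generate_masc_dict
-- ===== SOURCE A (Python) =====
-- def _generate_masc_dict(passphrase: str) -> tuple[dict[int, int], dict[int, int]]:
--     # eliminate duplicates
--     passphrase = ''.join(dict.fromkeys(passphrase))
--
--     enc_dict = dict()
--     dec_dict = dict()
--
--     # passphrase portion
--     for i, c in enumerate(passphrase):
--         c = ord(c) - ord('A')
--         enc_dict[i] = c
--         dec_dict[c] = i
--
--     # fill with alphabetical continuation
--     while i < 25:
--         i += 1
--         while c in dec_dict: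
--             c = (c + 1) % 26
--         enc_dict[i] = c
--         dec_dict[c] = i
--
--     return enc_dict, dec_dict
-- ===== SOURCE B (Python) =====
-- # B: instead of A's stateful wrap-forward skip-scan, B sorts the unused residues
-- # 0..25 by the rotated key (r - last - 1) % 26 and truncates; both dicts then fall
-- # out of one enumerate.  Objective: alternative (sort-based fill vs scan-based fill).
-- def _generate_masc_dict(passphrase: str) -> tuple[dict[int, int], dict[int, int]]:
--     seen = set()
--     head = []
--     for ch in passphrase:
--         v = ord(ch) - 65
--         if v not in seen:
--             seen.add(v)
--             head.append(v)
--     last = head[-1]  # empty passphrase unsupported (A raises UnboundLocalError there)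
--     need = max(0, 26 - len(head))
--     tail = sorted((r for r in range(26) if r not in seen),
--                   key=lambda r: (r - last - 1) % 26)[:need]
--     seq = head + tail
--     return dict(enumerate(seq)), {v: i for i, v in enumerate(seq)}
-- ===== Notes on version B (the rewrite author's own statement) =====
-- stated objective: alternative
-- what changed: A fills the tail with a stateful while-loop that wraps forward from the last letter skipping used residues while interleaving insertions into both dicts; B computes the unused residues 0..25 once, sorts them by the rotated key (r-last-1)%26, truncates, and derives both dicts from a single enumerate of the full sequence.
-- outside the precondition, e.g. on _generate_masc_dict(''): A raises UnboundLocalError, B raises IndexError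
import Mathlib
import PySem

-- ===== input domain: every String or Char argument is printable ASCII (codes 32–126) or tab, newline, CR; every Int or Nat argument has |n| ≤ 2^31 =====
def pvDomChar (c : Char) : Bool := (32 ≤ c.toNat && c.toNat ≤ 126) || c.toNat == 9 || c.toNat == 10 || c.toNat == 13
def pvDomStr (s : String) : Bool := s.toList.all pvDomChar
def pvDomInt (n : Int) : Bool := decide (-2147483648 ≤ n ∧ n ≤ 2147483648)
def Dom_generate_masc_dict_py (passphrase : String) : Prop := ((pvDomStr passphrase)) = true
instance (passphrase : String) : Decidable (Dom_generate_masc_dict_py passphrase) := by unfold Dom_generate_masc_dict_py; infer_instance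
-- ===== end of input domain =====

-- B replaces A's stateful wrap-forward skip-scan fill by sorting the unused residues 0..25
-- under the rotated key (r - last - 1) % 26 and truncating, then derives both dicts from
-- one enumerate of the full sequence; objective: alternative decomposition, same cost.

-- ===== PORT A =====
-- helper for A's inner `while c in dec_dict: c = (c + 1) % 26`; the fuel (27) only makes the
-- loop total: on every input admitted by Pre_ a free value is hit within 27 checks.
def mascSkip (dec : PySem.Dict Int Int) (c : Int) : Nat → Int
  | 0 => c
  | n+1 => if dec.contains c then mascSkip dec (PySem.Int.mod (c + 1) 26) n else c

-- A's outer `while i < 25` loop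
def mascFill (enc dec : PySem.Dict Int Int) (i c : Int) :
    PySem.Dict Int Int × PySem.Dict Int Int :=
  if _h : i < 25 then
    let i' := i + 1
    let c' := mascSkip dec c 27
    mascFill (enc.insert i' c') (dec.insert c' i') i' c'
  else (enc, dec)
termination_by (25 - i).toNat
decreasing_by omega

def generate_masc_dict_py (passphrase : String) : (List (Int × Int)) × (List (Int × Int)) :=
  -- passphrase = ''.join(dict.fromkeys(passphrase))
  let p : List Char := PySem.List.dedup passphrase.toList
  match p with
  | [] => ([], [])  -- Python: i, c stay unbound and `while i < 25` raises UnboundLocalError; excluded by Pre_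
  | _ :: _ =>
    let st := (PySem.List.enumerate p 0).foldl
      (fun (st : PySem.Dict Int Int × PySem.Dict Int Int × Int × Int) ic =>
        let c : Int := (ic.2.toNat : Int) - 65   -- ord(c) - ord('A')
        (st.1.insert ic.1 c, st.2.1.insert c ic.1, ic.1, c))
      (PySem.Dict.empty, PySem.Dict.empty, 0, 0)
    let r := mascFill st.1 st.2.1 st.2.2.1 st.2.2.2
    (r.1.items, r.2.items)

-- ===== PORT B =====
def generate_masc_dict_py_alt (passphrase : String) : (List (Int × Int)) × (List (Int × Int)) :=
  -- seen = set(); head = []; for ch: v = ord(ch)-65; if v not in seen: seen.add(v); head.append(v)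
  let st := passphrase.toList.foldl
    (fun (st : PySem.Set Int × List Int) ch =>
      let v : Int := (ch.toNat : Int) - 65
      if PySem.Set.contains st.1 v then st else (PySem.Set.add st.1 v, st.2 ++ [v]))
    ((PySem.Set.empty : PySem.Set Int), [])
  let seen := st.1
  let head := st.2
  match PySem.List.pyGet? head (-1) with
  | none => ([], [])  -- IndexError on head[-1] for the empty passphrase; excluded by Pre_
  | some last =>
    let need : Int := max 0 (26 - (head.length : Int))
    -- sorted((r for r in range(26) if r not in seen), key=lambda r: (r - last - 1) % 26)[:need]
    let tail : List Int := PySem.List.slice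
      (PySem.List.sorted
        ((PySem.List.pyRange 0 26 1).filter (fun r => !(PySem.Set.contains seen r)))
        (fun r => PySem.Int.mod (r - last - 1) 26) false)
      none (some need)
    let seq := head ++ tail
    (((PySem.List.enumerate seq 0).foldl (fun d q => d.insert q.1 q.2)
        (PySem.Dict.empty : PySem.Dict Int Int)).items,
     ((PySem.List.enumerate seq 0).foldl (fun d q => d.insert q.2 q.1)
        (PySem.Dict.empty : PySem.Dict Int Int)).items)

-- ===== PRECONDITION & SPEC =====
-- Pre_ excludes only the empty passphrase, on which A raises UnboundLocalError.
def Pre_generate_masc_dict_py (passphrase : String) : Prop := passphrase ≠ ""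
instance (passphrase : String) : Decidable (Pre_generate_masc_dict_py passphrase) := by
  unfold Pre_generate_masc_dict_py; infer_instance

def pvWitness_generate_masc_dict_py : String := "KRYPTO"

-- A raises UnboundLocalError on the empty passphrase; B raises IndexError there too (head[-1]),
-- so no Raises_ block: neither program returns.

def Spec_generate_masc_dict_py (passphrase : String) (out : (List (Int × Int)) × (List (Int × Int))) : Prop := out = generate_masc_dict_py_alt passphrase
instance (passphrase : String) (out : (List (Int × Int)) × (List (Int × Int))) : Decidable (Spec_generate_masc_dict_py passphrase out) := by unfold Spec_generate_masc_dict_py; infer_instance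

-- ===== CLAIM (what is proved, stated in full; the proofs are below) =====
def Claim_equal_generate_masc_dict_py : Prop := ∀ (passphrase : String), Dom_generate_masc_dict_py passphrase → Pre_generate_masc_dict_py passphrase → Spec_generate_masc_dict_py passphrase (generate_masc_dict_py passphrase)

-- ===== LEMMAS AND PROOFS =====

-- value of a character, ord(ch) - 65
def pvVal (ch : Char) : Int := (ch.toNat : Int) - 65

def pvEncD (seq : List Int) : PySem.Dict Int Int :=
  (PySem.List.enumerate seq 0).foldl (fun d q => d.insert q.1 q.2) PySem.Dict.empty
def pvDecD (seq : List Int) : PySem.Dict Int Int :=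
  (PySem.List.enumerate seq 0).foldl (fun d q => d.insert q.2 q.1) PySem.Dict.empty

-- the scan [(c+1)%26, (c+2)%26, ..., (c+n)%26]
def pvScan (c : Int) : Nat → List Int
  | 0 => []
  | n+1 => PySem.Int.mod (c + 1) 26 :: pvScan (c + 1) n

def pvWin (c : Int) : List Int := pvScan c 26

-- list-membership version of mascSkip
def pvSkipL (used : List Int) (c : Int) : Nat → Int
  | 0 => c
  | n+1 => if c ∈ used then pvSkipL used (PySem.Int.mod (c + 1) 26) n else c

def pvExt (seq : List Int) (c : Int) (k : Nat) : List Int :=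
  ((pvWin c).filter (fun r => !(decide (r ∈ seq)))).take k

theorem pvVal_inj {a b : Char} (h : pvVal a = pvVal b) : a = b := by
  apply Char.ext
  apply UInt32.toNat_inj.mp
  show a.toNat = b.toNat
  simp only [pvVal] at h
  omega

theorem pvmod (a : Int) : PySem.Int.mod a 26 = a % 26 :=
  PySem.Int.mod_eq_emod_of_pos (by norm_num)

theorem pvScan_congr (c c' : Int) (h : c % 26 = c' % 26) (n : Nat) :
    pvScan c n = pvScan c' n := by
  induction n generalizing c c' with
  | zero => rfl
  | succ n ih =>
    simp only [pvScan]
    rw [pvmod, pvmod, ih (c + 1) (c' + 1) (by omega)]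
    congr 1
    omega

theorem pvScan_append (c : Int) (n m : Nat) :
    pvScan c (n + m) = pvScan c n ++ pvScan (c + n) m := by
  induction n generalizing c with
  | zero => rw [Nat.zero_add]; simp [pvScan]
  | succ n ih =>
    have h1 : n + 1 + m = (n + m) + 1 := by omega
    rw [h1]
    simp only [pvScan, List.cons_append]
    congr 1
    rw [ih (c + 1)]
    congr 2
    push_cast
    ring

theorem pvScan_map (c : Int) (n : Nat) :
    pvScan c n = (List.range n).map (fun (j : Nat) => (c + 1 + (j : Int)) % 26) := by
  induction n generalizing c with
  | zero => rfl
  | succ n ih =>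
    rw [List.range_succ_eq_map, List.map_cons, List.map_map]
    simp only [pvScan]
    congr 1
    · rw [pvmod]; norm_num
    · rw [ih (c + 1)]
      apply List.map_congr_left
      intro j _
      simp only [Function.comp_apply]
      congr 1
      push_cast
      ring

theorem pvWin_nodup (c : Int) : (pvWin c).Nodup := by
  rw [pvWin, pvScan_map]
  refine List.Nodup.map_on ?_ List.nodup_range
  intro x hx y hy h
  simp only [List.mem_range] at hx hy
  omega

theorem pvSkipL_walk (used : List Int) :
    ∀ (T : List Int) (c : Int) (n : Nat) (r : Int) (W2 : List Int),
      pvScan c n = T ++ r :: W2 → (∀ x ∈ T, x ∈ used) → r ∉ used → c ∈ used →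
      ∀ fuel, T.length + 2 ≤ fuel → pvSkipL used c fuel = r := by
  intro T
  induction T with
  | nil =>
    intro c n r W2 hscan _ hr hc fuel hfuel
    cases n with
    | zero => simp [pvScan] at hscan
    | succ n =>
      simp only [pvScan, List.nil_append] at hscan
      obtain ⟨hr1, _⟩ := List.cons.inj hscan
      obtain ⟨f, rfl⟩ : ∃ f, fuel = f + 1 := ⟨fuel - 1, by omega⟩
      obtain ⟨f', rfl⟩ : ∃ f', f = f' + 1 := ⟨f - 1, by omega⟩
      simp only [pvSkipL, if_pos hc, hr1, if_neg hr]
  | cons t T' ih =>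
    intro c n r W2 hscan hT hr hc fuel hfuel
    cases n with
    | zero => simp [pvScan] at hscan
    | succ n =>
      simp only [pvScan, List.cons_append] at hscan
      obtain ⟨ht1, hrest⟩ := List.cons.inj hscan
      obtain ⟨f, rfl⟩ : ∃ f, fuel = f + 1 := ⟨fuel - 1, by omega⟩
      simp only [pvSkipL, if_pos hc]
      have hcong : pvScan (PySem.Int.mod (c + 1) 26) n = T' ++ r :: W2 := by
        rw [pvScan_congr (PySem.Int.mod (c + 1) 26) (c + 1) (by rw [pvmod]; omega) n]
        exact hrest
      rw [ht1]
      have hfuel' : T'.length + 2 ≤ f := by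
        simp only [List.length_cons] at hfuel
        omega
      exact ih t n r W2 (ht1 ▸ hcong) (fun x hx => hT x (List.mem_cons_of_mem _ hx)) hr
        (hT t List.mem_cons_self) f hfuel'

theorem mascSkip_eq_pvSkipL (dec : PySem.Dict Int Int) (c : Int) (fuel : Nat) :
    mascSkip dec c fuel = pvSkipL dec.keys c fuel := by
  induction fuel generalizing c with
  | zero => rfl
  | succ n ih =>
    simp only [mascSkip, pvSkipL]
    by_cases h : c ∈ dec.keys
    · rw [if_pos ((PySem.Dict.contains_iff_mem_keys dec c).mpr h), if_pos h, ih]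
    · rw [if_neg (fun hb => h ((PySem.Dict.contains_iff_mem_keys dec c).mp hb)), if_neg h]

theorem pvEncD_append (seq : List Int) (x : Int) :
    pvEncD (seq ++ [x]) = (pvEncD seq).insert (seq.length : Int) x := by
  unfold pvEncD
  rw [PySem.List.enumerate_append, List.foldl_append]
  simp [PySem.List.enumerate_cons, PySem.List.enumerate_nil]

theorem pvDecD_append (seq : List Int) (x : Int) :
    pvDecD (seq ++ [x]) = (pvDecD seq).insert x (seq.length : Int) := by
  unfold pvDecD
  rw [PySem.List.enumerate_append, List.foldl_append]
  simp [PySem.List.enumerate_cons, PySem.List.enumerate_nil]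

theorem pvFoldAdd_nodup (l : List Int) :
    ∀ (acc : List Int), l.Nodup → (∀ x ∈ l, x ∉ acc) → l.foldl PySem.Set.add acc = acc ++ l := by
  induction l with
  | nil => intro acc _ _; simp
  | cons x l ih =>
    intro acc hnd hdisj
    simp only [List.foldl_cons]
    rw [PySem.Set.add_of_not_mem (hdisj x List.mem_cons_self)]
    rw [ih (acc ++ [x]) hnd.of_cons]
    · simp
    · intro y hy
      simp only [List.mem_append, List.mem_singleton]
      rintro (hy' | rfl)
      · exact hdisj y (List.mem_cons_of_mem _ hy) hy'
      · exact (List.nodup_cons.mp hnd).1 hy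

theorem pvDecD_keys (seq : List Int) (h : seq.Nodup) : (pvDecD seq).keys = seq := by
  unfold pvDecD
  rw [PySem.Dict.keys_foldl_insert_key (PySem.List.enumerate seq 0) (fun q => q.2)
      (fun _ q => q.1) PySem.Dict.empty]
  rw [PySem.List.map_snd_enumerate, PySem.Dict.keys_empty, PySem.Set.update_eq_foldl]
  rw [pvFoldAdd_nodup seq [] h (by simp)]
  simp

-- A's enumerate-fold, characterised
theorem pvFoldA (p : List Char) (hne : p ≠ []) :
    ∀ (s : Int) (e d : PySem.Dict Int Int) (i0 c0 : Int),
      (PySem.List.enumerate p s).foldl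
        (fun (st : PySem.Dict Int Int × PySem.Dict Int Int × Int × Int) ic =>
          let c : Int := (ic.2.toNat : Int) - 65
          (st.1.insert ic.1 c, st.2.1.insert c ic.1, ic.1, c)) (e, d, i0, c0)
      = ((PySem.List.enumerate (p.map pvVal) s).foldl (fun d' q => d'.insert q.1 q.2) e,
         (PySem.List.enumerate (p.map pvVal) s).foldl (fun d' q => d'.insert q.2 q.1) d,
         s + p.length - 1, pvVal (p.getLast hne)) := by
  induction p with
  | nil => cases hne rfl
  | cons x xs ih =>
    intro s e d i0 c0
    by_cases hx : xs = []
    · subst hx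
      simp [PySem.List.enumerate_cons, PySem.List.enumerate_nil, pvVal]
    · rw [PySem.List.enumerate_cons, List.foldl_cons]
      rw [ih hx (s + 1)]
      rw [List.map_cons, PySem.List.enumerate_cons, List.foldl_cons, List.foldl_cons]
      rw [List.getLast_cons hx]
      simp only [pvVal, List.length_cons, Prod.mk.injEq]
      refine ⟨trivial, trivial, by push_cast; ring, trivial⟩

-- the Int-valued dedup fold builds the values of A's character dedup
theorem pvFoldB (l : List Char) :
    ∀ (acc : List Char),
      l.foldl (fun a ch => if pvVal ch ∈ a then a else a ++ [pvVal ch]) (acc.map pvVal)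
      = (l.foldl PySem.Set.add acc).map pvVal := by
  induction l with
  | nil => intro acc; simp
  | cons ch l ih =>
    intro acc
    simp only [List.foldl_cons]
    by_cases hc : ch ∈ acc
    · rw [if_pos (List.mem_map_of_mem hc), PySem.Set.add_of_mem hc]
      exact ih acc
    · have hv : pvVal ch ∉ acc.map pvVal := by
        intro hm
        obtain ⟨a, ha, he⟩ := List.mem_map.mp hm
        exact hc (pvVal_inj he ▸ ha)
      rw [if_neg hv, PySem.Set.add_of_not_mem hc]
      rw [show acc.map pvVal ++ [pvVal ch] = (acc ++ [ch]).map pvVal by simp]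
      exact ih (acc ++ [ch])

-- B's (seen, head) fold keeps seen and head equal as lists; both compute the Int dedup fold
theorem pvFoldSt (l : List Char) :
    ∀ (a : List Int),
      l.foldl
        (fun (st : PySem.Set Int × List Int) ch =>
          let v : Int := (ch.toNat : Int) - 65
          if PySem.Set.contains st.1 v then st else (PySem.Set.add st.1 v, st.2 ++ [v]))
        (a, a)
      = (l.foldl (fun acc ch => if pvVal ch ∈ acc then acc else acc ++ [pvVal ch]) a,
         l.foldl (fun acc ch => if pvVal ch ∈ acc then acc else acc ++ [pvVal ch]) a) := by
  induction l with
  | nil => intro a; rfl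
  | cons ch l ih =>
    intro a
    simp only [List.foldl_cons, pvVal]
    by_cases hc : ((ch.toNat : Int) - 65) ∈ a
    · rw [if_pos (show PySem.Set.contains a ((ch.toNat : Int) - 65) = true by
          simp [PySem.Set.contains, hc]), if_pos hc]
      exact ih a
    · rw [if_neg (show ¬ PySem.Set.contains a ((ch.toNat : Int) - 65) = true by
          simp [PySem.Set.contains, hc]), if_neg hc,
        PySem.Set.add_of_not_mem hc]
      exact ih (a ++ [((ch.toNat : Int) - 65)])

-- membership in the rotated window: exactly the residues 0..25
theorem pvWin_mem (c x : Int) : x ∈ pvWin c ↔ 0 ≤ x ∧ x < 26 := by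
  rw [pvWin, pvScan_map]
  constructor
  · intro hx
    obtain ⟨j, _, rfl⟩ := List.mem_map.mp hx
    constructor <;> omega
  · intro ⟨h0, h1⟩
    apply List.mem_map.mpr
    refine ⟨((x - c - 1) % 26).toNat, ?_, ?_⟩
    · apply List.mem_range.mpr
      omega
    · have : (((x - c - 1) % 26).toNat : Int) = (x - c - 1) % 26 := by omega
      rw [this]
      omega

-- the rotated key reads off the scan index
theorem pvWin_pairwise_key (c : Int) :
    (pvWin c).Pairwise (fun a b => (a - c - 1) % 26 < (b - c - 1) % 26) := by
  rw [pvWin, pvScan_map, List.pairwise_iff_getElem]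
  intro i j hi hj hij
  simp only [List.length_map, List.length_range] at hi hj
  simp only [List.getElem_map, List.getElem_range]
  omega

-- the sorted unused residues equal A's scan-order unused residues
theorem pvSortedUnused (w : List Int) (c : Int) :
    PySem.List.sorted
      ((PySem.List.pyRange 0 26 1).filter (fun r => !(decide (r ∈ w))))
      (fun r => PySem.Int.mod (r - c - 1) 26) false
    = (pvWin c).filter (fun r => !(decide (r ∈ w))) := by
  apply PySem.List.sorted_eq_of_perm_of_pairwise_lt
  · -- permutation: both filter the same nodup set of residues
    apply List.Perm.filter
    apply (List.perm_ext_iff_of_nodup (pvWin_nodup c) ?_).mpr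
    · intro x
      rw [pvWin_mem, PySem.List.pyRange_one]
      constructor
      · intro ⟨h0, h1⟩
        apply List.mem_map.mpr
        exact ⟨x.toNat, by simp [List.mem_range]; omega, by omega⟩
      · intro hx
        obtain ⟨j, hj, rfl⟩ := List.mem_map.mp hx
        simp only [List.mem_range] at hj
        norm_num
        omega
    · rw [PySem.List.pyRange_one]
      refine List.Nodup.map_on ?_ List.nodup_range
      intro x _ y _ h
      omega
  · -- strictly increasing key along the scan
    apply List.Pairwise.filter
    have := pvWin_pairwise_key c
    apply this.imp
    intro a b hab
    rw [pvmod, pvmod]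
    exact hab

-- the core: A's fill loop appends exactly the unused residues of the rotated window
theorem pvFill (k : Nat) :
    ∀ (seq : List Int) (hne : seq ≠ []), seq.Nodup →
      (seq.length + k = 26 ∨ (k = 0 ∧ 26 ≤ seq.length)) →
      k ≤ ((pvWin (seq.getLast hne)).filter (fun r => !(decide (r ∈ seq)))).length →
      mascFill (pvEncD seq) (pvDecD seq) ((seq.length : Int) - 1) (seq.getLast hne)
        = (pvEncD (seq ++ pvExt seq (seq.getLast hne) k),
           pvDecD (seq ++ pvExt seq (seq.getLast hne) k)) := by
  induction k with
  | zero =>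
    intro seq hne hnd hlen _
    have h26 : 26 ≤ seq.length := by rcases hlen with h | ⟨_, h⟩ <;> omega
    rw [mascFill, dif_neg (by push_cast; omega)]
    simp [pvExt]
  | succ k ih =>
    intro seq hne hnd hlen hcnt
    have hlen' : seq.length + (k + 1) = 26 := by rcases hlen with h | ⟨h0, _⟩ <;> omega
    set c := seq.getLast hne with hc
    have hcmem : c ∈ seq := hc ▸ List.getLast_mem hne
    set T := (pvWin c).takeWhile (fun x => decide (x ∈ seq)) with hT
    set D := (pvWin c).dropWhile (fun x => decide (x ∈ seq)) with hD
    have hTD : T ++ D = pvWin c := List.takeWhile_append_dropWhile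
    have hDne : D ≠ [] := by
      intro h0
      have hf : (pvWin c).filter (fun x => !(decide (x ∈ seq))) = [] := by
        rw [← hTD, h0, List.append_nil, List.filter_eq_nil_iff]
        intro a ha
        simp [List.mem_takeWhile_imp (hT ▸ ha)]
      rw [hf] at hcnt
      simp at hcnt
    obtain ⟨r, W2, hDr⟩ := List.exists_cons_of_ne_nil hDne
    have hdw : (pvWin c).dropWhile (fun x => decide (x ∈ seq)) = r :: W2 := hD.symm.trans hDr
    have hrfree : r ∉ seq := by
      have hw : (pvWin c).dropWhile (fun x => decide (x ∈ seq)) ≠ [] := by rw [hdw]; simp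
      have hhead : (fun x => decide (x ∈ seq)) (((pvWin c).dropWhile (fun x => decide (x ∈ seq))).head hw) = false :=
        List.head_dropWhile_not _ hw
      have h3 : ((pvWin c).dropWhile (fun x => decide (x ∈ seq))).head hw = r := by simp [hdw]
      rw [h3] at hhead
      simpa using hhead
    have hTmem : ∀ x ∈ T, x ∈ seq := by
      intro x hx
      have := List.mem_takeWhile_imp (hT ▸ hx)
      simpa using this
    have hwin : pvWin c = T ++ r :: W2 := by rw [← hTD, hDr]
    have hwlen : (pvWin c).length = 26 := by rw [pvWin, pvScan_map]; simp
    have hTlen : T.length ≤ 25 := by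
      have := congrArg List.length hwin
      simp only [List.length_append, List.length_cons] at this
      omega
    have hsp : (T.length + 1) + (25 - T.length) = 26 := by omega
    have hsplit1 : pvScan c ((T.length + 1) + (25 - T.length)) =
        pvScan c (T.length + 1) ++ pvScan (c + ((T.length + 1 : Nat) : Int)) (25 - T.length) :=
      pvScan_append c (T.length + 1) (25 - T.length)
    have h1 : pvScan c (T.length + 1) ++ pvScan (c + ((T.length + 1 : Nat) : Int)) (25 - T.length) =
        (T ++ [r]) ++ W2 := by
      rw [← hsplit1, hsp, show pvScan c 26 = pvWin c from rfl, hwin]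
      simp
    have h2 : (pvScan c (T.length + 1)).length = (T ++ [r]).length := by
      rw [pvScan_map]
      simp
    obtain ⟨hTr, hW2⟩ := List.append_inj h1 h2
    have hrval : r = (c + T.length + 1) % 26 := by
      have h3 : pvScan c (T.length + 1) = pvScan c T.length ++ pvScan (c + (T.length : Int)) 1 := by
        have := pvScan_append c T.length 1
        simpa using this
      rw [hTr] at h3
      have h4 : pvScan (c + (T.length : Int)) 1 = [(c + T.length + 1) % 26] := by
        simp [pvScan, pvmod]
      rw [h4] at h3
      have h5 : T.length = (pvScan c T.length).length := by
        rw [pvScan_map]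
        simp
      obtain ⟨_, h6⟩ := List.append_inj h3 h5
      exact (List.cons.inj h6).1
    have hrot : pvWin r = W2 ++ (T ++ [r]) := by
      show pvScan r 26 = _
      rw [pvScan_congr r (c + ((T.length + 1 : Nat) : Int)) (by push_cast; omega) 26]
      have hsp2 : (25 - T.length) + (T.length + 1) = 26 := by omega
      rw [← hsp2, pvScan_append, hW2]
      congr 1
      rw [pvScan_congr (c + ((T.length + 1 : Nat) : Int) + (((25 - T.length : Nat)) : Int)) c
        (by push_cast; omega) (T.length + 1)]
      exact hTr
    have hnodupw := pvWin_nodup c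
    rw [hwin] at hnodupw
    have hrW2 : r ∉ W2 := by
      rcases List.nodup_append.mp hnodupw with ⟨_, hnd2, _⟩
      exact (List.nodup_cons.mp hnd2).1
    have hskip : mascSkip (pvDecD seq) c 27 = r := by
      rw [mascSkip_eq_pvSkipL, pvDecD_keys seq hnd]
      exact pvSkipL_walk seq T c 26 r W2 hwin hTmem hrfree hcmem 27 (by omega)
    have hfiltc : (pvWin c).filter (fun x => !(decide (x ∈ seq)))
        = r :: W2.filter (fun x => !(decide (x ∈ seq))) := by
      rw [hwin, List.filter_append]
      rw [List.filter_eq_nil_iff.mpr (fun a ha => by simp [hTmem a ha])]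
      simp [hrfree]
    rw [hfiltc] at hcnt
    simp only [List.length_cons] at hcnt
    set seq' := seq ++ [r] with hseq'
    have hne' : seq' ≠ [] := by simp [hseq']
    have hnd' : seq'.Nodup := by
      rw [hseq']
      refine List.Nodup.append hnd (List.nodup_singleton r) ?_
      intro a ha hb
      rw [List.mem_singleton] at hb
      exact hrfree (hb ▸ ha)
    have hlast' : seq'.getLast hne' = r := by
      have h9 : seq'.getLast? = some r := by rw [hseq']; exact List.getLast?_concat
      rw [List.getLast?_eq_getLast hne'] at h9
      exact Option.some.inj h9
    have hfiltr : (pvWin r).filter (fun x => !(decide (x ∈ seq')))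
        = W2.filter (fun x => !(decide (x ∈ seq))) := by
      rw [hrot, List.filter_append, List.filter_append]
      have hTnil : T.filter (fun x => !(decide (x ∈ seq'))) = [] :=
        List.filter_eq_nil_iff.mpr (fun a ha => by simp [hseq', hTmem a ha])
      have hrnil : ([r] : List Int).filter (fun x => !(decide (x ∈ seq'))) = [] := by
        simp [hseq']
      rw [hTnil, hrnil, List.append_nil, List.append_nil]
      apply List.filter_congr
      intro x hx
      have hxr : x ≠ r := fun h => hrW2 (h ▸ hx)
      simp [hseq', hxr]
    have hlt : ((seq.length : Int) - 1) < 25 := by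
      have : seq.length ≤ 25 := by omega
      push_cast
      omega
    rw [mascFill, dif_pos hlt]
    simp only [hskip]
    have hidx : ((seq.length : Int) - 1) + 1 = ((seq.length : Nat) : Int) := by ring
    rw [hidx, ← pvEncD_append, ← pvDecD_append, ← hseq']
    have hidx2 : ((seq.length : Nat) : Int) = ((seq'.length : Nat) : Int) - 1 := by
      rw [hseq']
      push_cast
      simp
    rw [hidx2]
    have IH := ih seq' hne' hnd' (Or.inl (by rw [hseq']; simp; omega))
      (by rw [hlast', hfiltr]; omega)
    rw [hlast'] at IH
    rw [IH]
    have hextk : pvExt seq' r k = (W2.filter (fun x => !(decide (x ∈ seq)))).take k := by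
      unfold pvExt
      rw [hfiltr]
    have hext : seq ++ pvExt seq c (k + 1) = seq' ++ pvExt seq' r k := by
      rw [hextk]
      unfold pvExt
      rw [hfiltc, hseq']
      simp [List.take_succ_cons]
    rw [← hext]

theorem pvGetLast_map (p : List Char) (h : p ≠ []) (h2 : p.map pvVal ≠ []) :
    (p.map pvVal).getLast h2 = pvVal (p.getLast h) := by
  have hmap := List.getLast?_map (f := pvVal) (l := p)
  rw [List.getLast?_eq_getLast h, List.getLast?_eq_getLast h2] at hmap
  simpa using hmap

-- ===== VERDICT (by name: the statement is the Claim_ definition above) =====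
theorem generate_masc_dict_py_spec : Claim_equal_generate_masc_dict_py := by
  intro s _ hpre
  unfold Spec_generate_masc_dict_py
  have hl : s.toList ≠ [] := fun h => hpre (String.toList_eq_nil_iff.mp h)
  have hpne : PySem.List.dedup s.toList ≠ [] := by
    intro h
    obtain ⟨x, xs, hxl⟩ := List.exists_cons_of_ne_nil hl
    have hx : x ∈ PySem.List.dedup s.toList := by
      rw [PySem.List.mem_dedup, hxl]
      exact List.mem_cons_self
    rw [h] at hx
    exact List.not_mem_nil hx
  obtain ⟨x, xs, hxs⟩ := List.exists_cons_of_ne_nil hpne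
  set w := List.map pvVal (x :: xs) with hw
  have hwne : w ≠ [] := by simp [hw]
  have hwnd : w.Nodup := by
    rw [hw, ← hxs]
    exact List.Nodup.map (fun a b h => pvVal_inj h) (PySem.List.nodup_dedup _)
  have hcnt : 26 - w.length ≤
      ((pvWin (w.getLast hwne)).filter (fun y => !(decide (y ∈ w)))).length := by
    have hlenwin : (pvWin (w.getLast hwne)).length = 26 := by rw [pvWin, pvScan_map]; simp
    have hsplit := List.length_eq_length_filter_add
      (l := pvWin (w.getLast hwne)) (fun y => decide (y ∈ w))
    have hsub : ((pvWin (w.getLast hwne)).filter (fun y => decide (y ∈ w))).length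
        ≤ w.length := by
      apply List.Subperm.length_le
      apply List.Nodup.subperm (List.Nodup.filter _ (pvWin_nodup _))
      intro y hy
      have := List.of_mem_filter hy
      simpa using this
    omega
  have hA : generate_masc_dict_py s =
      ((pvEncD (w ++ pvExt w (w.getLast hwne) (26 - w.length))).items,
       (pvDecD (w ++ pvExt w (w.getLast hwne) (26 - w.length))).items) := by
    unfold generate_masc_dict_py
    rw [hxs]
    simp only []
    rw [pvFoldA (x :: xs) (by simp) 0 PySem.Dict.empty PySem.Dict.empty 0 0]
    simp only []
    have hidx : (0 : Int) + ((x :: xs).length : Int) - 1 = (w.length : Int) - 1 := by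
      rw [hw]; simp
    rw [hidx]
    rw [show pvVal ((x :: xs).getLast (by simp)) = w.getLast hwne from
      (pvGetLast_map (x :: xs) (by simp) hwne).symm]
    rw [← hw]
    exact congrArg (fun z => (z.1.items, z.2.items))
      (pvFill (26 - w.length) w hwne hwnd (by omega) hcnt)
  have hB : generate_masc_dict_py_alt s =
      ((pvEncD (w ++ pvExt w (w.getLast hwne) (26 - w.length))).items,
       (pvDecD (w ++ pvExt w (w.getLast hwne) (26 - w.length))).items) := by
    unfold generate_masc_dict_py_alt
    have hst : s.toList.foldl
        (fun (st : PySem.Set Int × List Int) ch =>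
          let v : Int := (ch.toNat : Int) - 65
          if PySem.Set.contains st.1 v then st else (PySem.Set.add st.1 v, st.2 ++ [v]))
        ((PySem.Set.empty : PySem.Set Int), []) = (w, w) := by
      have h0 := pvFoldSt s.toList []
      have h1 := pvFoldB s.toList []
      simp only [List.map_nil] at h1
      have hwv : s.toList.foldl
          (fun acc ch => if pvVal ch ∈ acc then acc else acc ++ [pvVal ch]) [] = w := by
        rw [h1, hw, ← hxs, PySem.List.dedup_eq_ofList, PySem.Set.ofList_eq_foldl]
      rw [show ((PySem.Set.empty : PySem.Set Int), ([] : List Int))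
          = (([] : List Int), ([] : List Int)) from rfl]
      rw [h0, hwv]
    rw [hst]
    dsimp only
    rw [PySem.List.pyGet?_neg_one, List.getLast?_eq_getLast hwne]
    simp only []
    rw [show (List.filter (fun r => !(PySem.Set.contains w r)) (PySem.List.pyRange 0 26 1))
          = (PySem.List.pyRange 0 26 1).filter (fun r => !(decide (r ∈ w))) from
        List.filter_congr (fun r _ => by simp [PySem.Set.contains])]
    rw [pvSortedUnused w (w.getLast hwne)]
    rw [PySem.List.slice_to _ (le_max_left 0 _)]
    rw [show (max 0 (26 - (w.length : Int))).toNat = 26 - w.length from by omega]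
    rfl
  rw [hA, hB]
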